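-- pv_equiv track=rewrite | github.com/serge42/python-x64-compiler | my_compiler.py | _build_interference
-- ===== SOURCE A (Python) =====
-- def _build_interference(liveness):
--     assert isinstance(liveness, list)
--     graph = {} # {'v/reg': set([v/reg])}: adj. list of interdependent (virtual)registers
--     for s in liveness:
--         for reg in s:
--             if not reg in graph: graph[reg] = set()
--             neigh = s - set([reg]) # Set minus, take other (virtual)registers
--             graph[reg] = graph[reg].union(neigh)
--
--     return graph
-- ===== SOURCE B (Python) =====
-- def _build_interference(liveness):
--     # Two-pass rewrite: seed every register, then insert symmetric edges pairwise.
--     assert isinstance(liveness, list)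
--     graph = {}
--     for s in liveness:
--         for reg in s:
--             graph.setdefault(reg, set())
--     for s in liveness:
--         regs = list(s)
--         for i in range(len(regs)):
--             a = regs[i]
--             for b in regs[i + 1:]:
--                 graph[a].add(b)
--                 graph[b].add(a)
--     return graph
-- ===== Notes on version B (the rewrite author's own statement) =====
-- stated objective: alternative
-- what changed: A interleaves seeding with a per-register union of the rest of the set (building each row as graph[reg] | (s - {reg})); B first seeds every register in a separate pass and then inserts each interference edge once per unordered pair, symmetrically (graph[a].add(b); graph[b].add(a)).
import Mathlib
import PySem

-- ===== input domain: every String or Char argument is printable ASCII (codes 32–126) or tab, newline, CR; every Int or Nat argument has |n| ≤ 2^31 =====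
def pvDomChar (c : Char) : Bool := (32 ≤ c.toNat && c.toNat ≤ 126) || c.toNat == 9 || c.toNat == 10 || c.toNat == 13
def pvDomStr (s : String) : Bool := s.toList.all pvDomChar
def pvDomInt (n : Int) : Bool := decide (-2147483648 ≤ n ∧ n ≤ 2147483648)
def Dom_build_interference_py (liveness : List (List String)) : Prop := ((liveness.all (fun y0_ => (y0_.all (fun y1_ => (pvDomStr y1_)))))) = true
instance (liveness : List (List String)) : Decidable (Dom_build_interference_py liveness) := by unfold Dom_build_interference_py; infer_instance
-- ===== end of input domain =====

-- B builds the same interference graph by a different decomposition: a seeding pass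
-- followed by symmetric pairwise edge insertion, instead of A's interleaved
-- per-register union-of-the-rest.  Same asymptotic cost.

-- ===== PORT A =====
-- 'for s in liveness: for reg in s: if not reg in graph: graph[reg] = set();
--  neigh = s - set([reg]); graph[reg] = graph[reg].union(neigh)'
-- graph[reg] on the right-hand side is read with getD; the key is always present
-- (it was just seeded above), so the default is never used.
def build_interference_py (liveness : List (List String)) : List (String × List String) :=
  (liveness.foldl (fun graph s =>
      s.foldl (fun graph reg =>
        let graph := if graph.contains reg then graph else graph.insert reg PySem.Set.empty
        let neigh := PySem.Set.diff s (PySem.Set.ofList [reg])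
        graph.insert reg (PySem.Set.union (graph.getD reg PySem.Set.empty) neigh)) graph)
    PySem.Dict.empty).items

-- ===== PORT B =====
-- 'for i in range(len(regs)): a = regs[i]; for b in regs[i+1:]: graph[a].add(b); graph[b].add(a)'
-- pvEdges g regs is exactly that index loop (head against each element of the strict
-- suffix, then recurse on the suffix); graph[x].add(y) is modify x (·.add y) — the key
-- is always present after the seeding pass, so the default is never used.
def pvEdges (g : PySem.Dict String (PySem.Set String)) : List String → PySem.Dict String (PySem.Set String)
  | [] => g
  | a :: rest =>
      pvEdges (rest.foldl (fun g b =>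
        (g.modify a PySem.Set.empty (fun v => PySem.Set.add v b)).modify b PySem.Set.empty
          (fun v => PySem.Set.add v a)) g) rest

def build_interference_py_alt (liveness : List (List String)) : List (String × List String) :=
  let graph := liveness.foldl (fun g s =>
    s.foldl (fun g reg => g.setdefault reg PySem.Set.empty) g) PySem.Dict.empty
  (liveness.foldl (fun g s => pvEdges g s) graph).items

-- ===== PRECONDITION & SPEC =====
-- Pre_ excludes only inner lists with duplicate elements: an inner list models a
-- Python set[str] (distinct elements), so a list with duplicates represents no
-- Python input at all.
def Pre_build_interference_py (liveness : List (List String)) : Prop :=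
  ∀ s ∈ liveness, s.Nodup
instance (liveness : List (List String)) : Decidable (Pre_build_interference_py liveness) := by
  unfold Pre_build_interference_py; infer_instance

def pvWitness_build_interference_py : List (List String) := [["a", "b"], ["b", "c"], ["d"]]

def Spec_build_interference_py (liveness : List (List String)) (out : List (String × List String)) : Prop := out = build_interference_py_alt liveness
instance (liveness : List (List String)) (out : List (String × List String)) : Decidable (Spec_build_interference_py liveness out) := by unfold Spec_build_interference_py; infer_instance

-- ===== CLAIM (what is proved, stated in full; the proofs are below) =====
def Claim_equal_build_interference_py : Prop := ∀ (liveness : List (List String)), Dom_build_interference_py liveness → Pre_build_interference_py liveness → Spec_build_interference_py liveness (build_interference_py liveness)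

-- ===== LEMMAS AND PROOFS =====

def pvStepA (s : List String) (g : PySem.Dict String (PySem.Set String)) (reg : String) :
    PySem.Dict String (PySem.Set String) :=
  let g := if g.contains reg then g else g.insert reg PySem.Set.empty
  g.insert reg (PySem.Set.union (g.getD reg PySem.Set.empty)
    (PySem.Set.diff s (PySem.Set.ofList [reg])))

theorem pvStepA_eq (s : List String) :
    (fun (graph : PySem.Dict String (PySem.Set String)) reg =>
      let graph := if graph.contains reg then graph else graph.insert reg PySem.Set.empty
      let neigh := PySem.Set.diff s (PySem.Set.ofList [reg])
      graph.insert reg (PySem.Set.union (graph.getD reg PySem.Set.empty) neigh)) = pvStepA s := rfl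

theorem pvGetD_stepA (s : List String) (g : PySem.Dict String (PySem.Set String))
    (reg k : String) :
    (pvStepA s g reg).getD k [] =
      if k = reg then
        PySem.Set.union (g.getD reg []) (PySem.Set.diff s (PySem.Set.ofList [reg]))
      else g.getD k [] := by
  unfold pvStepA
  simp only [PySem.Set.empty]
  by_cases h : g.contains reg = true
  · simp only [h, if_true, PySem.Dict.getD_insert]
  · have hg : g.getD reg PySem.Set.empty = PySem.Set.empty :=
      PySem.Dict.getD_of_not_contains g _ (by simpa using h)
    simp only [h, Bool.false_eq_true, if_false, PySem.Dict.getD_insert]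
    split_ifs with h1 <;> simp_all [PySem.Set.empty]

theorem pvGetD_A_inner (s : List String) (t : List String) (ht : t.Nodup)
    (g : PySem.Dict String (PySem.Set String)) (k : String) :
    (t.foldl (pvStepA s) g).getD k [] =
      if k ∈ t then
        PySem.Set.union (g.getD k []) (PySem.Set.diff s (PySem.Set.ofList [k]))
      else g.getD k [] := by
  induction t generalizing g with
  | nil => simp
  | cons x t' ih =>
    obtain ⟨hx, ht'⟩ := List.nodup_cons.1 ht
    simp only [List.foldl_cons]
    rw [ih ht']
    by_cases hk : k ∈ t'
    · have hkx : k ≠ x := fun e => hx (e ▸ hk)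
      simp [hk, pvGetD_stepA, hkx]
    · by_cases hke : k = x <;> simp [hk, hke, hx, pvGetD_stepA]

theorem pvDiff_cons_ne (a k : String) (rest : List String) (h : a ≠ k) :
    PySem.Set.diff (a :: rest) [k] = a :: PySem.Set.diff rest [k] := by
  simp [PySem.Set.diff, PySem.Set.contains,  h]

theorem pvDiff_cons_self (a : String) (rest : List String) :
    PySem.Set.diff (a :: rest) [a] = PySem.Set.diff rest [a] := by
  simp [PySem.Set.diff, PySem.Set.contains]


theorem pvGetD_fanout (a : String) (rest : List String) (ha : a ∉ rest) (hr : rest.Nodup)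
    (g : PySem.Dict String (PySem.Set String)) (k : String) :
    (rest.foldl (fun g b =>
        (g.modify a PySem.Set.empty (fun v => PySem.Set.add v b)).modify b PySem.Set.empty
          (fun v => PySem.Set.add v a)) g).getD k [] =
      if k = a then PySem.Set.update (g.getD a []) rest
      else if k ∈ rest then PySem.Set.add (g.getD k []) a
      else g.getD k [] := by
  induction rest generalizing g with
  | nil =>
    simp only [List.foldl_nil, PySem.Set.update, List.not_mem_nil, if_false]
    split_ifs with h <;> simp [h]
  | cons b r' ih =>
    obtain ⟨hb, hr'⟩ := List.nodup_cons.1 hr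
    have hab : a ≠ b := fun e => ha (e ▸ List.mem_cons_self ..)
    have ha' : a ∉ r' := fun h => ha (List.mem_cons_of_mem _ h)
    simp only [List.foldl_cons]
    rw [ih ha' hr']
    by_cases hka : k = a
    · subst hka
      simp [PySem.Set.empty, PySem.Dict.getD_modify, hab, PySem.Set.update_cons]
    · by_cases hkb : k = b
      · subst hkb
        simp [PySem.Set.empty, PySem.Dict.getD_modify, hka, hb]
      · by_cases hkr : k ∈ r' <;>
          simp [PySem.Set.empty, PySem.Dict.getD_modify, hka, hkb, hkr]

theorem pvGetD_edges (t : List String) (ht : t.Nodup)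
    (g : PySem.Dict String (PySem.Set String)) (k : String) :
    (pvEdges g t).getD k [] =
      if k ∈ t then
        PySem.Set.update (g.getD k []) (PySem.Set.diff t (PySem.Set.ofList [k]))
      else g.getD k [] := by
  induction t generalizing g with
  | nil => simp [pvEdges]
  | cons a rest ih =>
    obtain ⟨ha, hr⟩ := List.nodup_cons.1 ht
    rw [pvEdges, ih hr, pvGetD_fanout a rest ha hr]
    by_cases hka : k = a
    · have hdiffa : PySem.Set.diff (a :: rest) (PySem.Set.ofList [a]) = rest := by
        rw [show PySem.Set.ofList [a] = [a] from rfl, pvDiff_cons_self]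
        unfold PySem.Set.diff
        apply List.filter_eq_self.2
        intro x hx
        simp [PySem.Set.contains]
        rintro rfl; exact ha hx
      simp [hka, ha, hdiffa]
    · by_cases hkr : k ∈ rest
      · have h2 : PySem.Set.diff (a :: rest) (PySem.Set.ofList [k]) =
            a :: PySem.Set.diff rest (PySem.Set.ofList [k]) := by
          rw [show PySem.Set.ofList [k] = [k] from rfl,
            pvDiff_cons_ne a k rest (fun e => hka e.symm)]
        simp [hka, hkr, h2, PySem.Set.update_cons]
      · simp [hka, hkr]

theorem pvGetD_seedStep (g : PySem.Dict String (PySem.Set String)) (r k : String) :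
    (g.setdefault r PySem.Set.empty).getD k [] = g.getD k [] := by
  by_cases h : k = r
  · subst h
    rw [PySem.Dict.getD_eq_get?_getD, PySem.Dict.get?_setdefault_self,
      PySem.Dict.getD_eq_get?_getD]
    cases g.get? k <;> rfl
  · rw [PySem.Dict.getD_eq_get?_getD, PySem.Dict.get?_setdefault_of_ne _ _ h,
      ← PySem.Dict.getD_eq_get?_getD]

theorem pvGetD_seedInner (t : List String) (g : PySem.Dict String (PySem.Set String)) (k : String) :
    (t.foldl (fun g reg => g.setdefault reg PySem.Set.empty) g).getD k [] = g.getD k [] := by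
  induction t generalizing g with
  | nil => rfl
  | cons r t' ih => rw [List.foldl_cons, ih, pvGetD_seedStep]

theorem pvGetD_seed (L : List (List String)) (g : PySem.Dict String (PySem.Set String)) (k : String) :
    (L.foldl (fun g s => s.foldl (fun g reg => g.setdefault reg PySem.Set.empty) g) g).getD k [] =
      g.getD k [] := by
  induction L generalizing g with
  | nil => rfl
  | cons s L' ih => rw [List.foldl_cons, ih, pvGetD_seedInner]

theorem pvKeys_stepA (s : List String) (g : PySem.Dict String (PySem.Set String)) (reg : String) :
    (pvStepA s g reg).keys = PySem.Set.add g.keys reg := by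
  unfold pvStepA
  by_cases h : g.contains reg = true
  · simp only [h, if_true]
    rw [PySem.Dict.keys_insert_of_contains _ _ h,
      PySem.Set.add_of_mem ((PySem.Dict.contains_iff_mem_keys _ _).1 h)]
  · simp only [h, Bool.false_eq_true, if_false]
    rw [PySem.Dict.keys_insert_of_contains _ _ (by simp),
      PySem.Dict.keys_insert_of_not_contains _ _ (by simpa using h),
      PySem.Set.add_of_not_mem (fun hm => h ((PySem.Dict.contains_iff_mem_keys _ _).2 hm))]

theorem pvKeys_A_inner (s t : List String) (g : PySem.Dict String (PySem.Set String)) :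
    (t.foldl (pvStepA s) g).keys = PySem.Set.update g.keys t := by
  induction t generalizing g with
  | nil => rfl
  | cons x t' ih => rw [List.foldl_cons, ih, pvKeys_stepA, PySem.Set.update_cons]

theorem pvKeys_seedStep (g : PySem.Dict String (PySem.Set String)) (r : String) :
    (g.setdefault r PySem.Set.empty).keys = PySem.Set.add g.keys r := by
  rw [PySem.Dict.keys_setdefault]
  by_cases h : g.contains r = true
  · rw [if_pos h, PySem.Set.add_of_mem ((PySem.Dict.contains_iff_mem_keys _ _).1 h)]
  · rw [if_neg h,
      PySem.Set.add_of_not_mem (fun hm => h ((PySem.Dict.contains_iff_mem_keys _ _).2 hm))]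

theorem pvKeys_seedInner (t : List String) (g : PySem.Dict String (PySem.Set String)) :
    (t.foldl (fun g reg => g.setdefault reg PySem.Set.empty) g).keys =
      PySem.Set.update g.keys t := by
  induction t generalizing g with
  | nil => rfl
  | cons x t' ih => rw [List.foldl_cons, ih, pvKeys_seedStep, PySem.Set.update_cons]

theorem pvKeys_modify_mem (g : PySem.Dict String (PySem.Set String)) (x : String)
    (f : PySem.Set String → PySem.Set String) (h : x ∈ g.keys) :
    (g.modify x PySem.Set.empty f).keys = g.keys := by
  rw [PySem.Dict.keys_modify,
    PySem.Dict.keys_insert_of_contains _ _ ((PySem.Dict.contains_iff_mem_keys _ _).2 h)]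

theorem pvKeys_fanout (a : String) (rest : List String)
    (g : PySem.Dict String (PySem.Set String)) (hak : a ∈ g.keys)
    (hrk : ∀ b ∈ rest, b ∈ g.keys) :
    (rest.foldl (fun g b =>
        (g.modify a PySem.Set.empty (fun v => PySem.Set.add v b)).modify b PySem.Set.empty
          (fun v => PySem.Set.add v a)) g).keys = g.keys := by
  induction rest generalizing g with
  | nil => rfl
  | cons b r' ih =>
    have h1 := pvKeys_modify_mem g a (fun v => PySem.Set.add v b) hak
    have h2 : (g.modify a PySem.Set.empty (fun v => PySem.Set.add v b)).keys = g.keys := h1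
    rw [List.foldl_cons, ih _ ?_ ?_]
    · rw [pvKeys_modify_mem _ b _ (by rw [h2]; exact hrk b (List.mem_cons_self ..)), h2]
    · rw [pvKeys_modify_mem _ b _ (by rw [h2]; exact hrk b (List.mem_cons_self ..)), h2]
      exact hak
    · intro x hx
      rw [pvKeys_modify_mem _ b _ (by rw [h2]; exact hrk b (List.mem_cons_self ..)), h2]
      exact hrk x (List.mem_cons_of_mem _ hx)

theorem pvKeys_edges (t : List String) (g : PySem.Dict String (PySem.Set String))
    (h : ∀ x ∈ t, x ∈ g.keys) : (pvEdges g t).keys = g.keys := by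
  induction t generalizing g with
  | nil => rfl
  | cons a rest ih =>
    have hf := pvKeys_fanout a rest g (h a (List.mem_cons_self ..))
      (fun b hb => h b (List.mem_cons_of_mem _ hb))
    rw [pvEdges, ih _ (fun x hx => by rw [hf]; exact h x (List.mem_cons_of_mem _ hx)), hf]

theorem pvKeys_A (L : List (List String)) (g : PySem.Dict String (PySem.Set String)) :
    (L.foldl (fun g s => s.foldl (pvStepA s) g) g).keys =
      PySem.Set.update g.keys L.flatten := by
  induction L generalizing g with
  | nil => rfl
  | cons s L' ih =>
    rw [List.foldl_cons, ih, pvKeys_A_inner, List.flatten_cons, PySem.Set.update_append]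

theorem pvKeys_seed (L : List (List String)) (g : PySem.Dict String (PySem.Set String)) :
    (L.foldl (fun g s => s.foldl (fun g reg => g.setdefault reg PySem.Set.empty) g) g).keys =
      PySem.Set.update g.keys L.flatten := by
  induction L generalizing g with
  | nil => rfl
  | cons s L' ih =>
    rw [List.foldl_cons, ih, pvKeys_seedInner, List.flatten_cons, PySem.Set.update_append]

theorem pvKeys_edgePass (L : List (List String)) (g : PySem.Dict String (PySem.Set String))
    (h : ∀ s ∈ L, ∀ x ∈ s, x ∈ g.keys) :
    (L.foldl (fun g s => pvEdges g s) g).keys = g.keys := by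
  induction L generalizing g with
  | nil => rfl
  | cons s L' ih =>
    have hs := pvKeys_edges s g (h s (List.mem_cons_self ..))
    rw [List.foldl_cons, ih _ (fun s' hs' x hx => by
      rw [hs]; exact h s' (List.mem_cons_of_mem _ hs') x hx), hs]

theorem pvGetD_A (L : List (List String)) (hL : ∀ s ∈ L, s.Nodup)
    (g : PySem.Dict String (PySem.Set String)) (k : String) :
    (L.foldl (fun g s => s.foldl (pvStepA s) g) g).getD k [] =
      L.foldl (fun v s =>
        if k ∈ s then PySem.Set.update v (PySem.Set.diff s (PySem.Set.ofList [k])) else v)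
        (g.getD k []) := by
  induction L generalizing g with
  | nil => rfl
  | cons s L' ih =>
    rw [List.foldl_cons, List.foldl_cons,
      ih (fun s' hs' => hL s' (List.mem_cons_of_mem _ hs')),
      pvGetD_A_inner s s (hL s (List.mem_cons_self ..)) g k]
    rfl

theorem pvGetD_B (L : List (List String)) (hL : ∀ s ∈ L, s.Nodup)
    (g : PySem.Dict String (PySem.Set String)) (k : String) :
    (L.foldl (fun g s => pvEdges g s) g).getD k [] =
      L.foldl (fun v s =>
        if k ∈ s then PySem.Set.update v (PySem.Set.diff s (PySem.Set.ofList [k])) else v)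
        (g.getD k []) := by
  induction L generalizing g with
  | nil => rfl
  | cons s L' ih =>
    rw [List.foldl_cons, List.foldl_cons,
      ih (fun s' hs' => hL s' (List.mem_cons_of_mem _ hs')),
      pvGetD_edges s (hL s (List.mem_cons_self ..)) g k]

theorem pvMain (liveness : List (List String)) (hPre : ∀ s ∈ liveness, s.Nodup) :
    (liveness.foldl (fun g s => s.foldl (pvStepA s) g) PySem.Dict.empty).items =
      (liveness.foldl (fun g s => pvEdges g s)
        (liveness.foldl (fun g s =>
          s.foldl (fun g reg => g.setdefault reg PySem.Set.empty) g) PySem.Dict.empty)).items := by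
  have hKA : (liveness.foldl (fun g s => s.foldl (pvStepA s) g) PySem.Dict.empty).keys =
      PySem.Set.ofList liveness.flatten := by
    rw [pvKeys_A]
    simp [PySem.Set.update_nil_left]
  have hKS : (liveness.foldl (fun g s =>
      s.foldl (fun g reg => g.setdefault reg PySem.Set.empty) g)
      (PySem.Dict.empty : PySem.Dict String (PySem.Set String))).keys =
      PySem.Set.ofList liveness.flatten := by
    rw [pvKeys_seed]
    simp [PySem.Set.update_nil_left]
  have hKB : (liveness.foldl (fun g s => pvEdges g s)
      (liveness.foldl (fun g s =>
        s.foldl (fun g reg => g.setdefault reg PySem.Set.empty) g)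
        (PySem.Dict.empty : PySem.Dict String (PySem.Set String)))).keys =
      PySem.Set.ofList liveness.flatten := by
    rw [pvKeys_edgePass, hKS]
    intro s hs x hx
    rw [hKS]
    exact (PySem.Set.mem_ofList _ _).2 (List.mem_flatten.2 ⟨s, hs, hx⟩)
  rw [PySem.Dict.items_eq_map_keys _ (by rw [hKA]; exact PySem.Set.nodup_ofList _) [],
    PySem.Dict.items_eq_map_keys _ (by rw [hKB]; exact PySem.Set.nodup_ofList _) [],
    hKA, hKB]
  apply List.map_congr_left
  intro k _
  rw [pvGetD_A liveness hPre, pvGetD_B liveness hPre, pvGetD_seed]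

-- ===== VERDICT (by name: the statement is the Claim_ definition above) =====
theorem build_interference_py_spec : Claim_equal_build_interference_py := by
  intro liveness _hDom hPre
  unfold Spec_build_interference_py build_interference_py build_interference_py_alt
  simp only [pvStepA_eq]
  exact pvMain liveness hPre
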